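-- pv_equiv track=rewrite | github.com/fragosoa/interview-prep | python/coding/puzzles/tunnel_time.py | getSecondsElapsed
-- ===== SOURCE A (Python) =====
-- from typing import List
--
-- def getSecondsElapsed(C: int, N: int, A: List[int], B: List[int], K: int) -> int:
--     L = [
--         (A[i],B[i])
--         for i in range(N)
--     ]
--     L.sort(key=lambda x: x[1])
--     s = sum([(end-start) for start,end in L])
--
--     total = (K//s)*C
--     rem = K%s
--
--     if K%s == 0:
--         total = ((K-1)//s)*C
--         rem = ((K-1)%s) + 1
--
--     last_end = 0
--     for start,end in L:
--         between = (last_end,start)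
--         total += (start-last_end)
--
--         rem -= (end-start)
--         total += (end-start)
--
--         if rem <= 0:
--             total += rem # if rem is negative, then we need to sum
--             return total
--         last_end = end
--
--     return total
--
-- C = 50
--
-- N = 3
--
-- A = [39, 19, 28]
--
-- B = [49, 27, 35]
--
-- K = 15
-- ===== SOURCE B (Python) =====
-- def _locate(ivs, lo, hi, rem):
--     # Divide and conquer over ivs[lo:hi]: returns (lit seconds in the segment,
--     # finishing position if the journey's remaining rem lit-seconds end inside it).
--     if hi <= lo:
--         return 0, None
--     if hi - lo == 1:
--         b, e = ivs[lo]
--         d = e - b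
--         return d, (e + rem - d) if d >= rem else None
--     mid = (lo + hi) // 2
--     dl, al = _locate(ivs, lo, mid, rem)
--     if al is not None:
--         return dl, al
--     dr, ar = _locate(ivs, mid, hi, rem - dl)
--     return dl + dr, ar
--
-- def getSecondsElapsed(C, N, A, B, K):
--     ivs = sorted(((A[i], B[i]) for i in range(N)), key=lambda p: p[1])
--     s = sum(e - b for b, e in ivs)
--     q, rem = divmod(K, s)
--     if rem == 0:
--         q, rem = divmod(K - 1, s)
--         rem += 1
--     ans = _locate(ivs, 0, len(ivs), rem)[1]
--     if ans is None:
--         return q * C + ivs[-1][1]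
--     return q * C + ans
-- ===== Notes on version B (the rewrite author's own statement) =====
-- stated objective: alternative
-- what changed: Replaces A's single linear walk with running position/last_end/remaining state by a divide-and-conquer segment search: after the sort, a recursive _locate splits the interval range in halves, returning each segment's lit-second total and, if the remaining lit-seconds end inside it, the finishing position reconstructed in closed form.
import Mathlib
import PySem

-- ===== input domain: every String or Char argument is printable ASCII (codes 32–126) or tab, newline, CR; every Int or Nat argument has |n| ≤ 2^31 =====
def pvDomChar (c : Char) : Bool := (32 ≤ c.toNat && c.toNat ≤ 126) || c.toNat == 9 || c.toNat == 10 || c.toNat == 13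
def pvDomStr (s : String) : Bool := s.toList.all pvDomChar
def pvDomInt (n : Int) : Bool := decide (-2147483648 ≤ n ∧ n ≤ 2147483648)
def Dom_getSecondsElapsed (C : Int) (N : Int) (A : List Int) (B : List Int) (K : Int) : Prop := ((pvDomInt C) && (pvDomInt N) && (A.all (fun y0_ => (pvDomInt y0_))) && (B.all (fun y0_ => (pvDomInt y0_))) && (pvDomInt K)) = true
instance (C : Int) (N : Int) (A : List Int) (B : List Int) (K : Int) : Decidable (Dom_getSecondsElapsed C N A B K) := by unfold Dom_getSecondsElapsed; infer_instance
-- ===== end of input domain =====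

-- B replaces A's single linear walk (position/last_end/remaining state) by a
-- divide-and-conquer segment search over the sorted intervals (objective: alternative).

-- ===== PORT A =====
-- A's for-loop with early return: state (total, last_end, rem)
def pvLoopA : List (Int × Int) → Int → Int → Int → Int
  | [], total, _, _ => total
  | (start, stop) :: rest, total, lastEnd, rem =>
      let total := total + (start - lastEnd)
      let rem := rem - (stop - start)
      let total := total + (stop - start)
      if rem ≤ 0 then total + rem
      else pvLoopA rest total stop rem

def getSecondsElapsed (C : Int) (N : Int) (A : List Int) (B : List Int) (K : Int) : Int :=
  let L := PySem.List.sorted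
    ((PySem.List.pyRange 0 N 1).map (fun i => (PySem.List.pyGetD A i 0, PySem.List.pyGetD B i 0)))
    (fun x => x.2) false
  let s := (L.map (fun p => p.2 - p.1)).sum
  if PySem.Int.mod K s = 0 then
    pvLoopA L ((PySem.Int.floordiv (K - 1) s) * C) 0 (PySem.Int.mod (K - 1) s + 1)
  else
    pvLoopA L ((PySem.Int.floordiv K s) * C) 0 (PySem.Int.mod K s)

-- ===== PORT B =====
-- B's recursive _locate over ivs[lo:hi]: (segment lit total, optional finish position)
def pvLocate (ivs : List (Int × Int)) (lo hi : Nat) (rem : Int) : Int × Option Int :=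
  if hi ≤ lo then (0, none)
  else if hi - lo = 1 then
    let p := ivs.getD lo (0, 0)
    let d := p.2 - p.1
    (d, if d ≥ rem then some (p.2 + rem - d) else none)
  else
    let mid := (lo + hi) / 2
    let r := pvLocate ivs lo mid rem
    match r.2 with
    | some a => (r.1, some a)
    | none =>
      let r2 := pvLocate ivs mid hi (rem - r.1)
      (r.1 + r2.1, r2.2)
termination_by hi - lo
decreasing_by all_goals omega

def getSecondsElapsed_alt (C : Int) (N : Int) (A : List Int) (B : List Int) (K : Int) : Int :=
  let ivs := PySem.List.sorted
    ((PySem.List.pyRange 0 N 1).map (fun i => (PySem.List.pyGetD A i 0, PySem.List.pyGetD B i 0)))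
    (fun p => p.2) false
  let s := (ivs.map (fun p => p.2 - p.1)).sum
  let q := PySem.Int.floordiv K s
  let rem := PySem.Int.mod K s
  let qr := if rem = 0 then (PySem.Int.floordiv (K - 1) s, PySem.Int.mod (K - 1) s + 1) else (q, rem)
  match (pvLocate ivs 0 ivs.length qr.2).2 with
  | none => qr.1 * C + ((PySem.List.pyGet? ivs (-1)).getD (0, 0)).2
  | some a => qr.1 * C + a

-- ===== PRECONDITION & SPEC =====
-- Pre_ excludes exactly the inputs where the Python A raises: N out of range of
-- the interval lists (IndexError) and a zero total lit duration s (ZeroDivisionError).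
def Pre_getSecondsElapsed (C : Int) (N : Int) (A : List Int) (B : List Int) (K : Int) : Prop :=
  0 ≤ N ∧ N ≤ A.length ∧ N ≤ B.length ∧
  ((List.range N.toNat).map (fun i => B.getD i 0 - A.getD i 0)).sum ≠ 0

instance (C : Int) (N : Int) (A : List Int) (B : List Int) (K : Int) : Decidable (Pre_getSecondsElapsed C N A B K) := by unfold Pre_getSecondsElapsed; infer_instance

def pvWitness_getSecondsElapsed : Int × Int × List Int × List Int × Int :=
  (50, 3, [39, 19, 28], [49, 27, 35], 15)

def Spec_getSecondsElapsed (C : Int) (N : Int) (A : List Int) (B : List Int) (K : Int) (out : Int) : Prop := out = getSecondsElapsed_alt C N A B K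
instance (C : Int) (N : Int) (A : List Int) (B : List Int) (K : Int) (out : Int) : Decidable (Spec_getSecondsElapsed C N A B K out) := by unfold Spec_getSecondsElapsed; infer_instance

-- ===== CLAIM (what is proved, stated in full; the proofs are below) =====
def Claim_equal_getSecondsElapsed : Prop := ∀ (C : Int) (N : Int) (A : List Int) (B : List Int) (K : Int), Dom_getSecondsElapsed C N A B K → Pre_getSecondsElapsed C N A B K → Spec_getSecondsElapsed C N A B K (getSecondsElapsed C N A B K)

-- ===== LEMMAS AND PROOFS =====

-- last end of the interval list, default d (A's telescoped fallback value)
def pvLastEnd : List (Int × Int) → Int → Int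
  | [], d => d
  | (_, e) :: t, _ => pvLastEnd t e

theorem pvLastEnd_eq_getLast : ∀ (l : List (Int × Int)) (d : Int),
    pvLastEnd l d = (l.getLast?.getD (d, d)).2 := by
  intro l
  induction l with
  | nil => intro d; simp [pvLastEnd]
  | cons p t ih =>
    intro d
    obtain ⟨b, e⟩ := p
    cases t with
    | nil => simp [pvLastEnd]
    | cons q t' => simpa [pvLastEnd, List.getLast?_cons_cons] using ih e

-- reference linear scan: full lit total and the located finish position
def pvScan : List (Int × Int) → Int → Int × Option Int
  | [], _ => (0, none)
  | (b, e) :: t, rem =>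
      let d := e - b
      let r := pvScan t (rem - d)
      (d + r.1, if d ≥ rem then some (e + rem - d) else r.2)

theorem pvScan_fst : ∀ (l : List (Int × Int)) (rem : Int),
    (pvScan l rem).1 = (l.map (fun p => p.2 - p.1)).sum := by
  intro l
  induction l with
  | nil => intro rem; simp [pvScan]
  | cons p t ih => intro rem; obtain ⟨b, e⟩ := p; simp [pvScan, ih]

theorem pvScan_append : ∀ (xs ys : List (Int × Int)) (rem : Int),
    (pvScan (xs ++ ys) rem).2 =
      match (pvScan xs rem).2 with
      | some a => some a
      | none => (pvScan ys (rem - (pvScan xs rem).1)).2 := by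
  intro xs
  induction xs with
  | nil => intro ys rem; simp [pvScan]
  | cons p t ih =>
    intro ys rem
    obtain ⟨b, e⟩ := p
    by_cases h : e - b ≥ rem
    · simp [pvScan, h]
    · simp only [List.cons_append, pvScan, if_neg h]
      rw [ih]
      rcases h2 : (pvScan t (rem - (e - b))).2 with _ | v
      · have : rem - (e - b) - (pvScan t (rem - (e - b))).1
             = rem - ((e - b) + (pvScan t (rem - (e - b))).1) := by ring
        rw [this]
      · simp

-- A's walk telescopes to the linear scan plus a closed-form offset
theorem pvLoopA_eq_scan : ∀ (l : List (Int × Int)) (total lastE rem : Int),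
    pvLoopA l total lastE rem =
      total - lastE + (match (pvScan l rem).2 with
        | some v => v
        | none => pvLastEnd l lastE) := by
  intro l
  induction l with
  | nil => intro total lastE rem; simp [pvLoopA, pvScan, pvLastEnd]
  | cons p t ih =>
    intro total lastE rem
    obtain ⟨b, e⟩ := p
    by_cases h : e - b ≥ rem
    · have hA : rem - (e - b) ≤ 0 := by omega
      simp only [pvLoopA, pvScan, if_pos hA, if_pos h]
      ring
    · have hA : ¬ rem - (e - b) ≤ 0 := by omega
      simp only [pvLoopA, pvScan, if_neg hA, if_neg h]
      rw [ih (total + (b - lastE) + (e - b)) e (rem - (e - b))]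
      rcases h2 : (pvScan t (rem - (e - b))).2 with _ | v
      · simp only [pvLastEnd]; ring
      · ring

-- the divide-and-conquer search agrees with the linear scan on every segment
theorem pvLocate_eq_scan : ∀ (n : Nat) (ivs : List (Int × Int)) (lo hi : Nat) (rem : Int),
    hi - lo ≤ n → hi ≤ ivs.length →
    (pvLocate ivs lo hi rem).2 = (pvScan ((ivs.drop lo).take (hi - lo)) rem).2 ∧
    ((pvScan ((ivs.drop lo).take (hi - lo)) rem).2 = none →
      (pvLocate ivs lo hi rem).1 =
        (((ivs.drop lo).take (hi - lo)).map (fun p => p.2 - p.1)).sum) := by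
  intro n
  induction n with
  | zero =>
    intro ivs lo hi rem hn _
    have hle : hi ≤ lo := by omega
    rw [pvLocate, if_pos hle]
    have : hi - lo = 0 := by omega
    simp [this, pvScan]
  | succ m ih =>
    intro ivs lo hi rem hn hlen
    by_cases hle : hi ≤ lo
    · rw [pvLocate, if_pos hle]
      have : hi - lo = 0 := by omega
      simp [this, pvScan]
    · by_cases h1 : hi - lo = 1
      · rw [pvLocate, if_neg hle, if_pos h1]
        have hlo : lo < ivs.length := by omega
        have hseg : (ivs.drop lo).take (hi - lo) = [ivs.getD lo (0, 0)] := by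
          rw [h1]
          have hd : ivs.drop lo = ivs[lo] :: ivs.drop (lo + 1) := List.drop_eq_getElem_cons hlo
          rw [hd, List.getD_eq_getElem ivs (0, 0) hlo]
          rfl
        rw [hseg]
        constructor
        · by_cases hc : (ivs.getD lo (0,0)).2 - (ivs.getD lo (0,0)).1 ≥ rem <;>
            simp [pvScan, hc]
        · intro _; simp
      · rw [pvLocate, if_neg hle, if_neg h1]
        have hmid1 : lo < (lo + hi) / 2 := by omega
        have hmid2 : (lo + hi) / 2 < hi := by omega
        set mid := (lo + hi) / 2 with hmid
        have hL := ih ivs lo mid rem (by omega) (by omega)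
        have hsplit : (ivs.drop lo).take (hi - lo)
            = (ivs.drop lo).take (mid - lo) ++ (ivs.drop mid).take (hi - mid) := by
          have h3 : hi - lo = (mid - lo) + (hi - mid) := by omega
          rw [h3, List.take_add]
          congr 1
          rw [List.drop_drop]
          congr 2
          omega
        rw [hsplit, pvScan_append]
        rcases hA : (pvLocate ivs lo mid rem).2 with _ | a
        · have hSL : (pvScan ((ivs.drop lo).take (mid - lo)) rem).2 = none := by
            rw [← hL.1, hA]
          have hsum := hL.2 hSL
          have hR := ih ivs mid hi (rem - (pvLocate ivs lo mid rem).1) (by omega) hlen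
          simp only [hA, hSL]
          have hrem : rem - (pvScan ((ivs.drop lo).take (mid - lo)) rem).1
              = rem - (pvLocate ivs lo mid rem).1 := by
            rw [pvScan_fst, hsum]
          rw [hrem]
          refine ⟨hR.1, fun hnone => ?_⟩
          rw [List.map_append, List.sum_append, ← hsum, hR.2 hnone]
        · have hSL : (pvScan ((ivs.drop lo).take (mid - lo)) rem).2 = some a := by
            rw [← hL.1, hA]
          simp [hA, hSL]

theorem pvLocate_top (ivs : List (Int × Int)) (rem : Int) :
    (pvLocate ivs 0 ivs.length rem).2 = (pvScan ivs rem).2 := by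
  have h := (pvLocate_eq_scan ivs.length ivs 0 ivs.length rem (by omega) (by omega)).1
  simpa using h

theorem pvLoopA_eq_altTail (l : List (Int × Int)) (base rem : Int) :
    pvLoopA l base 0 rem =
      (match (pvLocate l 0 l.length rem).2 with
        | none => base + ((PySem.List.pyGet? l (-1)).getD (0, 0)).2
        | some a => base + a) := by
  rw [pvLocate_top, pvLoopA_eq_scan]
  rcases h : (pvScan l rem).2 with _ | v
  · rw [PySem.List.pyGet?_neg_one, pvLastEnd_eq_getLast l 0]
    ring
  · ring

-- ===== VERDICT (by name: the statement is the Claim_ definition above) =====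
theorem getSecondsElapsed_spec : Claim_equal_getSecondsElapsed := by
  unfold Claim_equal_getSecondsElapsed
  intro C N A B K _ _
  unfold Spec_getSecondsElapsed getSecondsElapsed getSecondsElapsed_alt
  simp only []
  split
  · exact pvLoopA_eq_altTail _ _ _
  · exact pvLoopA_eq_altTail _ _ _
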